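-- pv_equiv track=rewrite | github.com/Hyobi-Lim/BAEKJOON_Programmers | 프로그래머스/1/155652. 둘만의 암호/둘만의 암호.py | solution
-- ===== SOURCE A (Python) =====
-- def solution(s, skip, index):
--     answer = ''
--     skiplist=[]
--     for i in s:
--         now=i
--         while(len(skiplist)!=index):
--             now=chr(ord(now)+1)
--             if ord(now)>ord('z'):
--                 now=chr(ord(now)-26)
--             if now not in skip:
--                 skiplist.append(now)
--         answer+=skiplist[len(skiplist)-1]
--         skiplist=[]
--     return answer
-- ===== SOURCE B (Python) =====
-- def solution(s, skip, index):
--     # advance each char by `index` positions, counting only chars not in `skip`;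
--     # after 'z' the walk wraps back 26, so past the initial climb it cycles a..z.
--     allowed = [chr(o) for o in range(97, 123) if chr(o) not in skip]
--     out = []
--     for ch in s:
--         e = ord(ch) + 1
--         if e > 122:
--             e -= 26
--         climb = [chr(o) for o in range(e, 123) if chr(o) not in skip]
--         if index <= len(climb):
--             out.append(climb[index - 1])
--         else:
--             out.append(allowed[(index - len(climb) - 1) % len(allowed)])
--     return ''.join(out)
-- ===== Notes on version B (the rewrite author's own statement) =====
-- stated objective: faster
-- what changed: Replaces A's per-character while-loop that advances one character at a time until index non-skip characters have been collected by a precomputed allowed-alphabet list plus direct indexing: the answer character is read off the filtered climb-to-'z' segment or found by modular arithmetic in the cyclic allowed alphabet.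
import Mathlib
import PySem

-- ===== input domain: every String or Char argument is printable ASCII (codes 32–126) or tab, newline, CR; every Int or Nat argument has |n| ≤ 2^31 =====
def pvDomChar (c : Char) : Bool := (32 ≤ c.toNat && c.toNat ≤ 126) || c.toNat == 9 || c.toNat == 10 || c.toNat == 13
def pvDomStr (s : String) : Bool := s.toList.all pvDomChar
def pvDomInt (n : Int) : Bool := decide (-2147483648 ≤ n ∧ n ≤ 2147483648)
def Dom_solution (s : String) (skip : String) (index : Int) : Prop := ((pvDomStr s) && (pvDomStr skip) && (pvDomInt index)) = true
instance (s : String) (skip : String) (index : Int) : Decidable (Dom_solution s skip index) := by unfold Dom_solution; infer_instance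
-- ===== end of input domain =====

-- B replaces A's per-character skipping walk (index iterations each) by a direct rank /
-- modular lookup in the precomputed climb segment and allowed-alphabet cycle.
-- ===== PORT A =====

-- the 'while len(skiplist)!=index' loop, with fuel (A diverges outside Pre_; the
-- fuel is never exhausted on inputs satisfying Pre_)
-- skiplist is carried back-to-front with its length cnt alongside, mirroring the
-- O(1) cost of Python's append and len; the stop case returns it front-to-back
def solutionLoop (skip : List Char) (index : Int) : Nat → Char → Nat → List Char → List Char
  | 0, _, _, skiplist => skiplist.reverse
  | fuel+1, now, cnt, skiplist =>
    if (cnt : Int) ≠ index then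
      -- now=chr(ord(now)+1)
      let now1 := Char.ofNat (now.toNat + 1)
      -- if ord(now)>ord('z'): now=chr(ord(now)-26)
      let now2 := if now1.toNat > 122 then Char.ofNat (now1.toNat - 26) else now1
      -- if now not in skip: skiplist.append(now)
      if !(PySem.Chars.isIn [now2] skip) then
        solutionLoop skip index fuel now2 (cnt + 1) (now2 :: skiplist)
      else
        solutionLoop skip index fuel now2 cnt skiplist
    else skiplist.reverse

def solution (s : String) (skip : String) (index : Int) : String :=
  String.ofList ((s.toList).foldl (fun answer i =>
    let skiplist := solutionLoop skip.toList index (124 * index.toNat + 125) i 0 []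
    -- answer += skiplist[len(skiplist)-1]   (IndexError when empty: outside Pre_)
    answer ++ [PySem.List.pyGetD skiplist ((skiplist.length : Int) - 1) 'a']) [])

-- ===== PORT B =====
def solution_alt (s : String) (skip : String) (index : Int) : String :=
  -- allowed = [chr(o) for o in range(97, 123) if chr(o) not in skip]
  let allowed := ((PySem.List.pyRange 97 123 1).map (fun o => Char.ofNat o.toNat)).filter
      (fun ch => !(PySem.Chars.isIn [ch] skip.toList))
  String.ofList ((s.toList).foldl (fun out ch =>
    let e : Int := if ((ch.toNat : Int) + 1) > 122 then ((ch.toNat : Int) + 1) - 26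
      else ((ch.toNat : Int) + 1)
    -- climb = [chr(o) for o in range(e, 123) if chr(o) not in skip]
    let climb := ((PySem.List.pyRange e 123 1).map (fun o => Char.ofNat o.toNat)).filter
      (fun c2 => !(PySem.Chars.isIn [c2] skip.toList))
    if index ≤ (climb.length : Int) then
      out ++ [PySem.List.pyGetD climb (index - 1) 'a']
    else
      out ++ [PySem.List.pyGetD allowed
        (PySem.Int.mod (index - (climb.length : Int) - 1) ((allowed.length : Int))) 'a']) [])

-- ===== PRECONDITION & SPEC =====
-- helpers for Pre_ (shared with the proofs below; reached by neither port):
-- code of the character one step after c, with the >'z' wrap-back of 26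
def stepN (c : Char) : Nat := if c.toNat + 1 > 122 then c.toNat + 1 - 26 else c.toNat + 1
def okC (skip : List Char) (c : Char) : Bool := !(PySem.Chars.isIn [c] skip)
-- the non-skip characters on the climb from c's successor up to 'z'
def climbL (skip : List Char) (c : Char) : List Char :=
  ((List.range (123 - stepN c)).map (fun k => Char.ofNat (stepN c + k))).filter (okC skip)
-- the non-skip lowercase letters
def alwL (skip : List Char) : List Char :=
  ((List.range 26).map (fun k => Char.ofNat (97 + k))).filter (okC skip)

-- Pre_ excludes exactly the inputs on which A does not return: with nonempty s,
-- index = 0 raises IndexError, index < 0 loops forever, and the walk also loops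
-- forever when every lowercase letter is in skip and some character's climb to 'z'
-- holds fewer than index non-skip characters.
def Pre_solution (s : String) (skip : String) (index : Int) : Prop :=
  s.toList = [] ∨ (1 ≤ index ∧
    ∀ c ∈ s.toList, alwL skip.toList ≠ [] ∨ index ≤ ((climbL skip.toList c).length : Int))
instance (s : String) (skip : String) (index : Int) : Decidable (Pre_solution s skip index) := by
  unfold Pre_solution; infer_instance
def pvWitness_solution : String × String × Int := ("", "", 1)

def Spec_solution (s : String) (skip : String) (index : Int) (out : String) : Prop := out = solution_alt s skip index
instance (s : String) (skip : String) (index : Int) (out : String) : Decidable (Spec_solution s skip index out) := by unfold Spec_solution; infer_instance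

-- ===== CLAIM (what is proved, stated in full; the proofs are below) =====
def Claim_equal_solution : Prop := ∀ (s : String) (skip : String) (index : Int), Dom_solution s skip index → Pre_solution s skip index → Spec_solution s skip index (solution s skip index)

-- ===== LEMMAS AND PROOFS =====
def stp (c : Char) : Char := Char.ofNat (stepN c)
theorem toNat_ofNat' (n : Nat) (h : n < 55296) : (Char.ofNat n).toNat = n := by
  unfold Char.ofNat; split
  · rfl
  · next hv => exact absurd (Or.inl h) hv
theorem stepN_le (c : Char) (h : c.toNat ≤ 126) : stepN c ≤ 122 := by
  unfold stepN; split <;> omega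
theorem stp_toNat (c : Char) (h : c.toNat ≤ 126) : (stp c).toNat = stepN c := by
  unfold stp; exact toNat_ofNat' _ (by have := stepN_le c h; omega)
theorem stp_le (c : Char) (h : c.toNat ≤ 126) : (stp c).toNat ≤ 126 := by
  rw [stp_toNat c h]
  have := stepN_le c h
  omega

theorem stepN_stp (c : Char) (h : c.toNat ≤ 126) (h2 : stepN c ≤ 121) :
    stepN (stp c) = stepN c + 1 := by
  have h3 := stp_toNat c h
  conv_lhs => unfold stepN
  rw [h3]; split_ifs with h4 <;> omega
theorem stepN_stp_z (c : Char) (h : c.toNat ≤ 126) (h2 : stepN c = 122) :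
    stepN (stp c) = 97 := by
  have h3 := stp_toNat c h
  conv_lhs => unfold stepN
  rw [h3, h2]; norm_num

theorem climbL_rec (skip : List Char) (c : Char) (h : c.toNat ≤ 126) (h2 : stepN c ≤ 121) :
    climbL skip c = (if okC skip (stp c) then [stp c] else []) ++ climbL skip (stp c) := by
  have hs := stepN_stp c h h2
  unfold climbL
  rw [hs]
  have h123 : 123 - stepN c = (122 - stepN c) + 1 := by omega
  rw [h123, List.range_succ_eq_map, List.map_cons, List.filter_cons]
  have h0 : Char.ofNat (stepN c + 0) = stp c := by rw [Nat.add_zero]; rfl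
  rw [h0]
  have hmap : (List.map Nat.succ (List.range (122 - stepN c))).map
        (fun k => Char.ofNat (stepN c + k)) =
      (List.range (123 - (stepN c + 1))).map (fun k => Char.ofNat (stepN c + 1 + k)) := by
    rw [List.map_map]
    have h5 : 123 - (stepN c + 1) = 122 - stepN c := by omega
    rw [h5]
    apply List.map_congr_left
    intro k _
    simp only [Function.comp_apply, Nat.succ_eq_add_one]
    congr 1; omega
  rw [hmap]
  by_cases hok : okC skip (stp c) <;> simp [hok]

theorem climbL_z (skip : List Char) (c : Char) (h : c.toNat ≤ 126) (h2 : stepN c = 122) :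
    climbL skip c = (if okC skip (stp c) then [stp c] else []) ∧
      climbL skip (stp c) = alwL skip := by
  constructor
  · unfold climbL
    rw [h2]
    have h3 : (123:Nat) - 122 = 1 := by norm_num
    rw [h3, List.range_one, List.map_cons, List.map_nil, List.filter_cons, List.filter_nil]
    have h0 : Char.ofNat (122 + 0) = stp c := by rw [Nat.add_zero]; unfold stp; rw [h2]
    rw [h0]
  · unfold climbL alwL
    rw [stepN_stp_z c h h2]

def nthF (skip : List Char) (c : Char) (k : Nat) : Char :=
  if h : k < (climbL skip c).length then (climbL skip c)[k]
  else (alwL skip).getD ((k - (climbL skip c).length) % (alwL skip).length) 'a'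

theorem modGetD (l : List Char) (k : Nat) :
    l.getD (k % l.length) 'a' =
      if h : k < l.length then l[k] else l.getD ((k - l.length) % l.length) 'a' := by
  by_cases hl : l = []
  · subst hl; simp
  · have hm : 0 < l.length := List.length_pos_of_ne_nil hl
    by_cases h : k < l.length
    · rw [dif_pos h, Nat.mod_eq_of_lt h, List.getD_eq_getElem l 'a' h]
    · rw [dif_neg h, Nat.mod_eq_sub_mod (by omega)]

theorem nthF_zero (skip : List Char) (c : Char) (h : c.toNat ≤ 126)
    (hok : okC skip (stp c) = true) : nthF skip c 0 = stp c := by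
  have hle := stepN_le c h
  unfold nthF
  by_cases h2 : stepN c ≤ 121
  · rw [climbL_rec skip c h h2, if_pos hok]
    simp
  · rw [(climbL_z skip c h (by omega)).1, if_pos hok]
    simp

theorem nthF_succ (skip : List Char) (c : Char) (h : c.toNat ≤ 126)
    (hok : okC skip (stp c) = true) (k : Nat) :
    nthF skip c (k + 1) = nthF skip (stp c) k := by
  have hle := stepN_le c h
  unfold nthF
  by_cases h2 : stepN c ≤ 121
  · rw [climbL_rec skip c h h2, if_pos hok]
    simp only [List.singleton_append, List.length_cons]
    by_cases hk : k < (climbL skip (stp c)).length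
    · rw [dif_pos (by omega), dif_pos hk]
      simp
    · rw [dif_neg (by omega), dif_neg hk]
      have he : k + 1 - ((climbL skip (stp c)).length + 1) = k - (climbL skip (stp c)).length := by
        omega
      rw [he]
  · obtain ⟨hc1, hc2⟩ := climbL_z skip c h (by omega)
    rw [hc1, if_pos hok, hc2]
    simp only [List.length_singleton]
    rw [dif_neg (by omega)]
    have : k + 1 - 1 = k := by omega
    rw [this]
    exact modGetD (alwL skip) k

theorem nthF_skip (skip : List Char) (c : Char) (h : c.toNat ≤ 126)
    (hok : okC skip (stp c) = false) (k : Nat) :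
    nthF skip c k = nthF skip (stp c) k := by
  have hle := stepN_le c h
  unfold nthF
  by_cases h2 : stepN c ≤ 121
  · rw [climbL_rec skip c h h2, if_neg (by simp [hok]), List.nil_append]
  · obtain ⟨hc1, hc2⟩ := climbL_z skip c h (by omega)
    rw [hc1, if_neg (by simp [hok]), hc2]
    simp only [List.length_nil, Nat.sub_zero]
    exact modGetD (alwL skip) k

theorem getD_le (l : List Char) (hall : ∀ x ∈ l, x.toNat ≤ 122) (i : Nat) :
    (l.getD i 'a').toNat ≤ 122 := by
  by_cases h : i < l.length
  · rw [List.getD_eq_getElem l 'a' h]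
    exact hall _ (List.getElem_mem h)
  · rw [List.getD_eq_default l 'a' (by omega)]
    decide

theorem mem_climbL (skip : List Char) (c : Char) {x : Char}
    (hx : x ∈ climbL skip c) :
    okC skip x = true ∧ ∃ k, k < 123 - stepN c ∧ x = Char.ofNat (stepN c + k) := by
  unfold climbL at hx
  obtain ⟨hm, hok⟩ := List.mem_filter.mp hx
  obtain ⟨k, hk, rfl⟩ := List.mem_map.mp hm
  exact ⟨hok, k, List.mem_range.mp hk, rfl⟩

theorem mem_alwL (skip : List Char) {x : Char} (hx : x ∈ alwL skip) :
    okC skip x = true ∧ ∃ k, k < 26 ∧ x = Char.ofNat (97 + k) := by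
  unfold alwL at hx
  obtain ⟨hm, hok⟩ := List.mem_filter.mp hx
  obtain ⟨k, hk, rfl⟩ := List.mem_map.mp hm
  exact ⟨hok, k, List.mem_range.mp hk, rfl⟩

theorem nthF_le (skip : List Char) (c : Char) (_h : c.toNat ≤ 126) (k : Nat) :
    (nthF skip c k).toNat ≤ 122 := by
  unfold nthF
  split
  · next hlt =>
    obtain ⟨-, k', hk', he⟩ := mem_climbL skip c (List.getElem_mem hlt)
    rw [he, toNat_ofNat' _ (by omega)]
    omega
  · apply getD_le
    intro x hx
    obtain ⟨-, k', hk', he⟩ := mem_alwL skip hx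
    rw [he, toNat_ofNat' _ (by omega)]
    omega

theorem stp_iter (d : Nat) : ∀ (c : Char), c.toNat + d ≤ 122 →
    stp^[d] c = Char.ofNat (c.toNat + d) := by
  induction d with
  | zero => intro c _; simp [Char.ofNat_toNat]
  | succ d ih =>
    intro c hc
    rw [Function.iterate_succ_apply]
    have h1 : (stp c).toNat = c.toNat + 1 := by
      rw [stp_toNat c (by omega)]; unfold stepN; split <;> omega
    rw [ih (stp c) (by omega), h1]
    congr 1; omega

theorem stp_iter_letter (t : Nat) : ∀ (c : Char), 97 ≤ c.toNat → c.toNat ≤ 122 →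
    97 ≤ (stp^[t] c).toNat ∧ (stp^[t] c).toNat ≤ 122 := by
  induction t with
  | zero => intro c h1 h2; simpa using ⟨h1, h2⟩
  | succ t ih =>
    intro c h1 h2
    rw [Function.iterate_succ_apply]
    have h3 : (stp c).toNat = stepN c := stp_toNat c (by omega)
    have h4 : 97 ≤ (stp c).toNat ∧ (stp c).toNat ≤ 122 := by
      rw [h3]; unfold stepN; split <;> omega
    exact ih _ h4.1 h4.2

theorem alwL_nil (skip : List Char) (h : alwL skip = []) (x : Char)
    (h1 : 97 ≤ x.toNat) (h2 : x.toNat ≤ 122) : okC skip x = false := by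
  unfold alwL at h
  rw [List.filter_eq_nil_iff] at h
  have hx : Char.ofNat (97 + (x.toNat - 97)) = x := by
    conv_rhs => rw [← Char.ofNat_toNat x]
    congr 1; omega
  have h3 := h (Char.ofNat (97 + (x.toNat - 97)))
    (List.mem_map.mpr ⟨x.toNat - 97, List.mem_range.mpr (by omega), rfl⟩)
  rw [hx] at h3
  simpa using h3

theorem stepN_pos (c : Char) (h : c.toNat ≤ 126) : 1 ≤ stepN c := by
  unfold stepN; split <;> omega

theorem good (skip : List Char) (c : Char) (h : c.toNat ≤ 126)
    (hp : alwL skip ≠ [] ∨ 1 ≤ (climbL skip c).length) :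
    ∃ j, 1 ≤ j ∧ j ≤ 124 ∧ okC skip (stp^[j] c) = true := by
  have ha1 := stepN_pos c h
  have ha2 := stepN_le c h
  have hstp := stp_toNat c h
  rcases hp with hne | hcl
  · obtain ⟨l, hl⟩ := List.exists_mem_of_ne_nil _ hne
    obtain ⟨hok, k, hk, rfl⟩ := mem_alwL skip hl
    have hlt : (Char.ofNat (97 + k)).toNat = 97 + k := toNat_ofNat' _ (by omega)
    by_cases ham : stepN c ≤ 97 + k
    · refine ⟨1 + (97 + k - stepN c), by omega, by omega, ?_⟩
      have he : stp^[1 + (97 + k - stepN c)] c = stp^[97 + k - stepN c] (stp c) := by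
        rw [Nat.add_comm, Function.iterate_add_apply, Function.iterate_one]
      rw [he, stp_iter _ (stp c) (by omega), hstp]
      have : stepN c + (97 + k - stepN c) = 97 + k := by omega
      rw [this]
      exact hok
    · -- climb to 'z', wrap to 'a', climb to the letter
      have e1 : stp^[122 - stepN c] (stp c) = Char.ofNat 122 := by
        rw [stp_iter _ (stp c) (by omega), hstp]
        congr 1; omega
      have e2 : stp (Char.ofNat 122) = Char.ofNat 97 := by
        unfold stp stepN
        rw [toNat_ofNat' 122 (by omega)]
        norm_num
      have e3 : stp^[k] (Char.ofNat 97) = Char.ofNat (97 + k) := by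
        rw [stp_iter k (Char.ofNat 97) (by rw [toNat_ofNat' 97 (by omega)]; omega),
          toNat_ofNat' 97 (by omega)]
      refine ⟨k + (1 + ((122 - stepN c) + 1)), by omega, by omega, ?_⟩
      rw [Function.iterate_add_apply, Function.iterate_add_apply, Function.iterate_one,
        Function.iterate_add_apply, Function.iterate_one, e1, e2, e3]
      exact hok
  · have hne2 : climbL skip c ≠ [] := by
      intro hnil
      rw [hnil] at hcl
      simp at hcl
    obtain ⟨l, hl⟩ := List.exists_mem_of_ne_nil _ hne2
    obtain ⟨hok, k, hk, rfl⟩ := mem_climbL skip c hl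
    refine ⟨1 + k, by omega, by omega, ?_⟩
    have he : stp^[1 + k] c = stp^[k] (stp c) := by
      rw [Nat.add_comm, Function.iterate_add_apply, Function.iterate_one]
    rw [he, stp_iter k (stp c) (by omega), hstp]
    exact hok

theorem loop_stop (skip : List Char) (index : Int) (f : Nat) (c : Char) (cnt : Nat)
    (sl : List Char) (h : (cnt : Int) = index) :
    solutionLoop skip index (f + 1) c cnt sl = sl.reverse := by
  simp [solutionLoop, h]

theorem now2_eq (c : Char) (h : c.toNat ≤ 126) :
    (if (Char.ofNat (c.toNat + 1)).toNat > 122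
      then Char.ofNat ((Char.ofNat (c.toNat + 1)).toNat - 26)
      else Char.ofNat (c.toNat + 1)) = stp c := by
  have h1 : (Char.ofNat (c.toNat + 1)).toNat = c.toNat + 1 := toNat_ofNat' _ (by omega)
  rw [h1]; unfold stp stepN
  split <;> rfl

theorem loop_step (skip : List Char) (index : Int) (f : Nat) (c : Char) (cnt : Nat)
    (sl : List Char) (h : c.toNat ≤ 126) (hne : (cnt : Int) ≠ index) :
    solutionLoop skip index (f + 1) c cnt sl =
      (if okC skip (stp c)
        then solutionLoop skip index f (stp c) (cnt + 1) (stp c :: sl)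
        else solutionLoop skip index f (stp c) cnt sl) := by
  conv_lhs => rw [solutionLoop]
  rw [if_pos hne]
  simp only [now2_eq c h]
  rfl

theorem loop_run (skip : List Char) (index : Int) :
    ∀ (mu : Nat) (c : Char), c.toNat ≤ 126 →
    (∃ j, 1 ≤ j ∧ j ≤ mu ∧ okC skip (stp^[j] c) = true) →
    ∃ t, 1 ≤ t ∧ t ≤ mu ∧
      (∀ (fuel cnt : Nat) (sl : List Char), t ≤ fuel → (cnt : Int) ≠ index →
        solutionLoop skip index fuel c cnt sl =
          solutionLoop skip index (fuel - t) (nthF skip c 0) (cnt + 1) (nthF skip c 0 :: sl)) ∧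
      (∀ k, nthF skip c (k + 1) = nthF skip (nthF skip c 0) k) ∧
      (alwL skip = [] → climbL skip c = nthF skip c 0 :: climbL skip (nthF skip c 0)) := by
  intro mu
  induction mu with
  | zero => intro c _ ⟨j, h1, h2, _⟩; omega
  | succ mu ih =>
    intro c hc ⟨j, hj1, hj2, hjok⟩
    by_cases hok : okC skip (stp c) = true
    · have h0 : nthF skip c 0 = stp c := nthF_zero skip c hc hok
      refine ⟨1, le_refl 1, by omega, ?_, ?_, ?_⟩
      · intro fuel cnt sl hf hne
        obtain ⟨f, rfl⟩ : ∃ f, fuel = f + 1 := ⟨fuel - 1, by omega⟩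
        rw [loop_step skip index f c cnt sl hc hne, if_pos hok, h0,
          show f + 1 - 1 = f by omega]
      · intro k
        rw [h0]
        exact nthF_succ skip c hc hok k
      · intro hnil
        rw [h0]
        have hle := stepN_le c hc
        by_cases h2 : stepN c ≤ 121
        · rw [climbL_rec skip c hc h2, if_pos hok, List.singleton_append]
        · obtain ⟨hc1, hc2⟩ := climbL_z skip c hc (by omega)
          rw [hc1, if_pos hok, hc2, hnil]
    · have hok' : okC skip (stp c) = false := by
        cases hx : okC skip (stp c)
        · rfl
        · exact absurd hx hok
      have hj2' : 2 ≤ j := by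
        by_contra hlt
        have hj_eq : j = 1 := by omega
        rw [hj_eq, Function.iterate_one] at hjok
        exact hok hjok
      have hiter : stp^[j] c = stp^[j-1] (stp c) := by
        conv_lhs => rw [show j = (j - 1) + 1 by omega]
        rw [Function.iterate_succ_apply]
      obtain ⟨t', ht1, ht2, hrun, hsucc, hclimb⟩ := ih (stp c) (stp_le c hc)
        ⟨j - 1, by omega, by omega, by rw [← hiter]; exact hjok⟩
      have h0 : nthF skip c 0 = nthF skip (stp c) 0 := nthF_skip skip c hc hok' 0
      refine ⟨t' + 1, by omega, by omega, ?_, ?_, ?_⟩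
      · intro fuel cnt sl hf hne
        obtain ⟨f, rfl⟩ : ∃ f, fuel = f + 1 := ⟨fuel - 1, by omega⟩
        rw [loop_step skip index f c cnt sl hc hne, hok']
        simp only [Bool.false_eq_true, if_false]
        rw [hrun f cnt sl (by omega) hne, h0]
        congr 1
        omega
      · intro k
        rw [nthF_skip skip c hc hok' (k + 1), h0, hsucc k]
      · intro hnil
        have hle := stepN_le c hc
        by_cases h2 : stepN c ≤ 121
        · rw [h0, climbL_rec skip c hc h2, hok']
          simp only [Bool.false_eq_true, if_false, List.nil_append]
          exact hclimb hnil
        · -- stp c = 'z' but every letter is skipped: contradicts the witness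
          exfalso
          have hz : (stp c).toNat = 122 := by rw [stp_toNat c hc]; omega
          have hlet := stp_iter_letter (j - 1) (stp c) (by omega) (by omega)
          have := alwL_nil skip hnil (stp^[j-1] (stp c)) hlet.1 hlet.2
          rw [← hiter] at this
          rw [hjok] at this
          simp at this

theorem loop_main (skip : List Char) (index : Int) :
    ∀ (d : Nat) (c : Char) (cnt : Nat) (sl : List Char) (fuel : Nat), c.toNat ≤ 126 →
    cnt = sl.length →
    (cnt : Int) + d = index →
    (alwL skip ≠ [] ∨ (d : Int) ≤ (climbL skip c).length) →
    124 * d + 1 ≤ fuel →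
    solutionLoop skip index fuel c cnt sl = sl.reverse ++ (List.range d).map (nthF skip c) := by
  intro d
  induction d with
  | zero =>
    intro c cnt sl fuel hc hcnt hlen _ hfuel
    obtain ⟨f, rfl⟩ : ∃ f, fuel = f + 1 := ⟨fuel - 1, by omega⟩
    rw [loop_stop skip index f c cnt sl (by push_cast at hlen ⊢; omega)]
    simp
  | succ d ih =>
    intro c cnt sl fuel hc hcnt hlen hside hfuel
    have hne : (cnt : Int) ≠ index := by omega
    have hgood : ∃ j, 1 ≤ j ∧ j ≤ 124 ∧ okC skip (stp^[j] c) = true := by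
      apply good skip c hc
      rcases hside with h | h
      · exact Or.inl h
      · right
        have : (0:Int) < (climbL skip c).length := by push_cast at h ⊢; omega
        omega
    obtain ⟨t, ht1, ht2, hrun, hsucc, hclimb⟩ := loop_run skip index 124 c hc hgood
    rw [hrun fuel cnt sl (by omega) hne]
    have hc1 : (nthF skip c 0).toNat ≤ 126 := by
      have := nthF_le skip c hc 0
      omega
    rw [ih (nthF skip c 0) (cnt + 1) (nthF skip c 0 :: sl) (fuel - t) hc1
      (by rw [List.length_cons, hcnt])
      (by push_cast at hlen ⊢; omega)
      (by
        by_cases hnil : alwL skip = []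
        · right
          rcases hside with h | h
          · exact absurd hnil h
          · rw [hclimb hnil, List.length_cons] at h
            push_cast at h ⊢
            omega
        · exact Or.inl hnil)
      (by omega)]
    rw [List.reverse_cons]
    have hmap2 : (List.range d).map (nthF skip (nthF skip c 0)) =
        (List.range d).map (nthF skip c ∘ Nat.succ) :=
      List.map_congr_left (fun k _ => by
        simp only [Function.comp_apply, Nat.succ_eq_add_one]
        exact (hsucc k).symm)
    rw [List.append_assoc, List.range_succ_eq_map, List.map_cons, List.map_map, hmap2,
      List.singleton_append]

theorem Achar (skip : List Char) (index : Int) (c : Char) (hc : c.toNat ≤ 126) (h1 : 1 ≤ index)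
    (hp : alwL skip ≠ [] ∨ index ≤ ((climbL skip c).length : Int)) :
    PySem.List.pyGetD (solutionLoop skip index (124 * index.toNat + 125) c 0 [])
      (((solutionLoop skip index (124 * index.toNat + 125) c 0 []).length : Int) - 1) 'a'
      = nthF skip c (index.toNat - 1) := by
  have hn : (index.toNat : Int) = index := Int.toNat_of_nonneg (by omega)
  have hm := loop_main skip index index.toNat c 0 [] (124 * index.toNat + 125) hc rfl
    (by simp [hn])
    (by
      rcases hp with h | h
      · exact Or.inl h
      · right; rw [hn]; exact h)
    (by omega)
  rw [hm]
  simp only [List.reverse_nil, List.nil_append, List.length_map, List.length_range]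
  have he : (index.toNat : Int) - 1 = ((index.toNat - 1 : Nat) : Int) := by omega
  rw [he, PySem.List.pyGetD, PySem.List.pyGet?_natCast]
  have hlt : index.toNat - 1 < ((List.range index.toNat).map (nthF skip c)).length := by
    simp
    omega
  rw [List.getElem?_eq_getElem hlt]
  simp [List.getElem_map]

theorem port_climb (skip : List Char) (c : Char) (hc : c.toNat ≤ 126) :
    ((PySem.List.pyRange (if ((c.toNat : Int) + 1) > 122 then ((c.toNat : Int) + 1) - 26
        else ((c.toNat : Int) + 1)) 123 1).map (fun o => Char.ofNat o.toNat)).filter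
      (fun x => !(PySem.Chars.isIn [x] skip)) = climbL skip c := by
  have he : (if ((c.toNat : Int) + 1) > 122 then ((c.toNat : Int) + 1) - 26
      else ((c.toNat : Int) + 1)) = ((stepN c : Nat) : Int) := by
    unfold stepN
    split_ifs with a b b <;> push_cast <;> omega
  rw [he, PySem.List.pyRange_one]
  have h2 : ((123 : Int) - (stepN c : Int)).toNat = 123 - stepN c := by
    have := stepN_le c hc
    omega
  rw [List.map_map, h2]
  unfold climbL okC
  congr 1

theorem port_alw (skip : List Char) :
    ((PySem.List.pyRange 97 123 1).map (fun o => Char.ofNat o.toNat)).filter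
      (fun x => !(PySem.Chars.isIn [x] skip)) = alwL skip := by
  rw [PySem.List.pyRange_one]
  have h2 : ((123 : Int) - 97).toNat = 26 := by decide
  rw [List.map_map, h2]
  unfold alwL okC
  congr 1

theorem pymod_pos (a b : Int) (h : 0 < b) : PySem.Int.mod a b = a % b := by
  simp [PySem.Int.mod, Int.fmod_eq_emod]
  intro h2
  omega

theorem Bchar (skip : List Char) (index : Int) (c : Char) (_hc : c.toNat ≤ 126) (h1 : 1 ≤ index)
    (hp : alwL skip ≠ [] ∨ index ≤ ((climbL skip c).length : Int)) :
    (if index ≤ ((climbL skip c).length : Int)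
      then PySem.List.pyGetD (climbL skip c) (index - 1) 'a'
      else PySem.List.pyGetD (alwL skip)
        (PySem.Int.mod (index - ((climbL skip c).length : Int) - 1)
          ((alwL skip).length : Int)) 'a')
    = nthF skip c (index.toNat - 1) := by
  have hn : (index.toNat : Int) = index := Int.toNat_of_nonneg (by omega)
  by_cases hle : index ≤ ((climbL skip c).length : Int)
  · rw [if_pos hle]
    have hlt : index.toNat - 1 < (climbL skip c).length := by omega
    have he : index - 1 = ((index.toNat - 1 : Nat) : Int) := by omega
    rw [he, PySem.List.pyGetD, PySem.List.pyGet?_natCast, List.getElem?_eq_getElem hlt]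
    unfold nthF
    rw [dif_pos hlt]
    rfl
  · rw [if_neg hle]
    have hnil : alwL skip ≠ [] := by
      rcases hp with h | h
      · exact h
      · exact absurd h hle
    have hmpos : 0 < (alwL skip).length := List.length_pos_of_ne_nil hnil
    have hgt : ((climbL skip c).length : Int) < index := by omega
    have hr : index - ((climbL skip c).length : Int) - 1 =
        ((index.toNat - 1 - (climbL skip c).length : Nat) : Int) := by omega
    rw [pymod_pos _ _ (by exact_mod_cast hmpos), hr, ← Int.natCast_mod]
    have hidx : (index.toNat - 1 - (climbL skip c).length) % (alwL skip).length <
        (alwL skip).length := Nat.mod_lt _ hmpos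
    rw [PySem.List.pyGetD, PySem.List.pyGet?_natCast, List.getElem?_eq_getElem hidx]
    unfold nthF
    rw [dif_neg (by omega)]
    rw [List.getD_eq_getElem _ 'a' hidx]
    rfl

theorem domChar_le (x : Char) (h : pvDomChar x = true) : x.toNat ≤ 126 := by
  simp [pvDomChar] at h
  omega

-- ===== VERDICT (by name: the statement is the Claim_ definition above) =====
theorem solution_spec : Claim_equal_solution := by
  intro s skip index hdom hpre
  unfold Spec_solution solution solution_alt
  rcases hpre with hnil | ⟨h1, hall⟩
  · rw [hnil]
    rfl
  · have hds : ∀ x ∈ s.toList, x.toNat ≤ 126 := by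
      intro x hx
      unfold Dom_solution pvDomStr at hdom
      simp only [Bool.and_eq_true, List.all_eq_true] at hdom
      exact domChar_le x (hdom.1.1 x hx)
    apply congrArg
    apply PySem.List.foldl_congr_mem
    intro acc x hx
    simp only []
    rw [Achar skip.toList index x (hds x hx) h1 (hall x hx),
      port_climb skip.toList x (hds x hx), port_alw skip.toList]
    have hb := Bchar skip.toList index x (hds x hx) h1 (hall x hx)
    by_cases hcond : index ≤ ((climbL skip.toList x).length : Int)
    · rw [if_pos hcond] at hb ⊢
      rw [← hb]
    · rw [if_neg hcond] at hb ⊢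
      rw [← hb]
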